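-- pv_equiv track=rewrite | github.com/parkercouch/foo.bar-codingChallenge | codingChallenge/accessCodes.py | answer
-- ===== SOURCE A (Python) =====
-- def answer(x):
--
-- 	already_used_codes = []
-- 	number_of_codes = 0
--
-- 	for code in x:
-- 		if code in already_used_codes:
-- 			pass
-- 		else:
-- 			number_of_codes += 1
-- 			#Add code and reversed code to list of used codes
-- 			already_used_codes.append(code)
-- 			already_used_codes.append(code[::-1])
--
-- 	return number_of_codes
-- ===== SOURCE B (Python) =====
-- def answer(x):
-- 	seen = set()
-- 	for code in x:
-- 		seen.add(min(code, code[::-1]))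
-- 	return len(seen)
-- ===== Notes on version B (the rewrite author's own statement) =====
-- stated objective: faster
-- what changed: Instead of storing both the code and its reverse in a list and doing a linear membership scan per element, B computes one canonical representative min(code, code[::-1]) per element and counts the distinct representatives with a hash set.
import Mathlib
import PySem

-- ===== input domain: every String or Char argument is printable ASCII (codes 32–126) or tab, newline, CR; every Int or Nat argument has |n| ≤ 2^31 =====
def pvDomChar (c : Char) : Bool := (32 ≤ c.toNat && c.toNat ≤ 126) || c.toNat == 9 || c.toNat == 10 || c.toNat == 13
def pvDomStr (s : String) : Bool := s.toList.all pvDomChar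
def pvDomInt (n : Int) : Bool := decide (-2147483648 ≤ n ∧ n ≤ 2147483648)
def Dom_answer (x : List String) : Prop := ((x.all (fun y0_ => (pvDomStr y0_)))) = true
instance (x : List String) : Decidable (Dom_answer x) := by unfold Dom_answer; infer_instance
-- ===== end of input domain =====

-- B replaces A's list-of-both-forms with a per-element canonical key min(code, code[::-1]) counted via a set (simpler, one membership structure).


-- ===== PORT A =====
-- shared helper: s[::-1]; exact by PySem.Str.slice?_none_none_neg_one
def pyRev (s : String) : String := String.ofList s.toList.reverse

-- loop body of A: skip if code already used, else count it and record code and its reverse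
def answerStep (st : List String × Int) (code : String) : List String × Int :=
  if code ∈ st.1 then st else (st.1 ++ [code, pyRev code], st.2 + 1)

def answer (x : List String) : Int :=
  (x.foldl answerStep (([] : List String), (0 : Int))).2

-- ===== PORT B =====
-- min(a, b) on Python strings: b if b < a else a, lexicographic by code points
def pyMinStr (a b : String) : String := if b.toList < a.toList then b else a

-- loop body of B: add the canonical representative of code to the set
def altStep (s : PySem.Set String) (code : String) : PySem.Set String :=
  PySem.Set.add s (pyMinStr code (pyRev code))

def answer_alt (x : List String) : Int :=
  ((x.foldl altStep (PySem.Set.empty : PySem.Set String)).length : Int)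

-- ===== PRECONDITION & SPEC =====
def Spec_answer (x : List String) (out : Int) : Prop := out = answer_alt x
instance (x : List String) (out : Int) : Decidable (Spec_answer x out) := by unfold Spec_answer; infer_instance

-- ===== CLAIM (what is proved, stated in full; the proofs are below) =====
def Claim_equal_answer : Prop := ∀ (x : List String), Dom_answer x → Spec_answer x (answer x)

-- ===== LEMMAS AND PROOFS =====
def canonStr (s : String) : String := pyMinStr s (pyRev s)

lemma rev_rev (s : String) : pyRev (pyRev s) = s := by
  simp [pyRev]

lemma pyMinStr_comm (a b : String) : pyMinStr a b = pyMinStr b a := by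
  unfold pyMinStr
  rcases lt_trichotomy a.toList b.toList with h | h | h
  · rw [if_neg (lt_asymm h), if_pos h]
  · rw [String.toList_injective h]
  · rw [if_pos h, if_neg (lt_asymm h)]

lemma canonStr_rev (s : String) : canonStr (pyRev s) = canonStr s := by
  unfold canonStr
  rw [rev_rev, pyMinStr_comm]

lemma canonStr_choice (s : String) : canonStr s = s ∨ canonStr s = pyRev s := by
  unfold canonStr pyMinStr
  split_ifs <;> simp

lemma canonStr_eq_iff (c r : String) :
    canonStr c = canonStr r ↔ (c = r ∨ c = pyRev r) := by
  constructor
  · intro h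
    rcases canonStr_choice c with hc | hc <;> rcases canonStr_choice r with hr | hr
    · exact Or.inl (hc ▸ hr ▸ h)
    · exact Or.inr (hc ▸ hr ▸ h)
    · have : pyRev c = r := hc ▸ hr ▸ h
      exact Or.inr (by rw [← this, rev_rev])
    · have : pyRev c = pyRev r := hc ▸ hr ▸ h
      exact Or.inl (by rw [← rev_rev c, this, rev_rev])
  · rintro (rfl | rfl)
    · rfl
    · exact canonStr_rev r

lemma mem_flat_iff (reps : List String) (c : String) :
    c ∈ reps.flatMap (fun r => [r, pyRev r]) ↔ canonStr c ∈ reps.map canonStr := by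
  simp only [List.mem_flatMap, List.mem_map, List.mem_cons,
    List.not_mem_nil, or_false]
  exact exists_congr fun r => and_congr_right fun _ =>
    (canonStr_eq_iff c r).symm.trans (eq_comm.trans (by tauto))

lemma altStep_eq (reps : List String) (c : String) :
    altStep (reps.map canonStr) c =
      if canonStr c ∈ reps.map canonStr then reps.map canonStr
      else reps.map canonStr ++ [canonStr c] := by
  by_cases h : canonStr c ∈ reps.map canonStr <;>
    simp [altStep, PySem.Set.add, PySem.Set.contains, canonStr]

lemma loop_eq (x : List String) : ∀ (reps : List String),
    (x.foldl answerStep (reps.flatMap (fun r => [r, pyRev r]), (reps.length : Int))).2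
      = ((x.foldl altStep (reps.map canonStr)).length : Int) := by
  induction x with
  | nil => intro reps; simp
  | cons c x ih =>
    intro reps
    simp only [List.foldl_cons]
    by_cases h : c ∈ reps.flatMap (fun r => [r, pyRev r])
    · rw [show answerStep (reps.flatMap (fun r => [r, pyRev r]), (reps.length : Int)) c
            = (reps.flatMap (fun r => [r, pyRev r]), (reps.length : Int)) from by
          simp [answerStep, h],
        altStep_eq, if_pos ((mem_flat_iff reps c).mp h)]
      exact ih reps
    · rw [show answerStep (reps.flatMap (fun r => [r, pyRev r]), (reps.length : Int)) c
            = ((reps ++ [c]).flatMap (fun r => [r, pyRev r]), ((reps ++ [c]).length : Int)) from by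
          simp [answerStep, h],
        altStep_eq, if_neg (fun hc => h ((mem_flat_iff reps c).mpr hc)),
        show reps.map canonStr ++ [canonStr c] = (reps ++ [c]).map canonStr from by simp]
      exact ih (reps ++ [c])

-- ===== VERDICT (by name: the statement is the Claim_ definition above) =====
theorem answer_spec : Claim_equal_answer := by
  intro x _
  unfold Spec_answer answer answer_alt
  simpa using loop_eq x []
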